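-- pv_equiv track=rewrite | github.com/cameronehrlich/HowHigh | scripts/export_screenshots.py | parse_attachment_name
-- ===== SOURCE A (Python) =====
-- from typing import Dict, List, Optional, Sequence, Tuple
--
-- SUPPORTED_LOCALES = [
--     "en-US",
--     "en-GB",
--     "es-ES",
--     "es-MX",
--     "zh-Hans",
--     "ja",
--     "ko",
--     "de-DE",
--     "fr-FR",
--     "pt-BR",
--     "ru",
--     "ar-SA",
-- ]
--
-- def parse_attachment_name(filename: str) -> Tuple[str, str, str]:
--     base = filename.rsplit(".", 1)[0]
--     if "_0_" in base:
--         base = base.split("_0_", 1)[0]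
--
--     detected_locale = None
--     remainder = ""
--     for locale in sorted(SUPPORTED_LOCALES, key=len, reverse=True):
--         if base == locale or base.startswith(f"{locale}-"):
--             detected_locale = locale
--             remainder = base[len(locale):]
--             if remainder.startswith("-"):
--                 remainder = remainder[1:]
--             break
--
--     if detected_locale is None and "-" in base:
--         detected_locale, remainder = base.split("-", 1)
--     if detected_locale is None:
--         detected_locale = "en-US"
--         remainder = base
--
--     remainder = remainder.strip()
--     if remainder:
--         if "-" in remainder:
--             device, label = remainder.rsplit("-", 1)
--         else:
--             device, label = remainder, "screenshot"
--     else: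
--         device, label = "device", "screenshot"
--
--     return detected_locale, device.strip(), label.strip()
-- ===== SOURCE B (Python) =====
-- SUPPORTED_LOCALES = [
--     "en-US",
--     "en-GB",
--     "es-ES",
--     "es-MX",
--     "zh-Hans",
--     "ja",
--     "ko",
--     "de-DE",
--     "fr-FR",
--     "pt-BR",
--     "ru",
--     "ar-SA",
-- ]
--
-- _LOCALE_SET = frozenset(SUPPORTED_LOCALES)
--
--
-- def parse_attachment_name(filename):
--     base = filename.rsplit(".", 1)[0]
--     if "_0_" in base:
--         base = base.split("_0_", 1)[0]
--
--     # A locale can match only at a dash boundary, so instead of trying every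
--     # locale against base, try every dash-boundary prefix of base (longest
--     # first) against the locale set.
--     dashes = [i for i in range(len(base)) if base[i] == "-"]
--     locale = None
--     for d in [len(base)] + dashes[::-1]:
--         if base[:d] in _LOCALE_SET:
--             locale, rest = base[:d], base[d + 1:]
--             break
--     if locale is None:
--         if dashes:
--             d0 = dashes[0]
--             locale, rest = base[:d0], base[d0 + 1:]
--         else:
--             locale, rest = "en-US", base
--
--     rest = rest.strip()
--     if rest:
--         if "-" in rest:
--             device, label = rest.rsplit("-", 1)
--         else:
--             device, label = rest, "screenshot"
--     else:
--         device, label = "device", "screenshot"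
--
--     return locale, device.strip(), label.strip()
-- ===== Notes on version B (the rewrite author's own statement) =====
-- stated objective: alternative
-- what changed: Instead of scanning the length-sorted locale list and testing each locale with ==/startswith against base, B enumerates the dash-boundary prefixes of base (longest first) and tests each against a frozenset of SUPPORTED_LOCALES; the no-match fallback reuses the first dash position already computed instead of re-splitting base.
import Mathlib
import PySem

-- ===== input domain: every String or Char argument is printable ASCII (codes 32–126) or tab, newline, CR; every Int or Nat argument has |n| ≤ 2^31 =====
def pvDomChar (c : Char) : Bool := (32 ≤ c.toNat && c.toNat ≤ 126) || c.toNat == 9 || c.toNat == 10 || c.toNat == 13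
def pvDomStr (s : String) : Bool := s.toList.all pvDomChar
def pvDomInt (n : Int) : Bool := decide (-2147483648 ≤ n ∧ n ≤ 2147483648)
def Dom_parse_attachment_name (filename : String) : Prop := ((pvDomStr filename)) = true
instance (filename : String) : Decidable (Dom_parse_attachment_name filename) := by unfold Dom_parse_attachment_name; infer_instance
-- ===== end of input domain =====

-- B replaces A's scan of the length-sorted locale list (with startswith tests) by a scan of the
-- dash-boundary prefixes of base (longest first) against a locale set; objective: alternative.

-- SUPPORTED_LOCALES (module constant shared by both programs)
def pvLocales : List (List Char) :=
  ["en-US".toList, "en-GB".toList, "es-ES".toList, "es-MX".toList, "zh-Hans".toList,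
   "ja".toList, "ko".toList, "de-DE".toList, "fr-FR".toList, "pt-BR".toList,
   "ru".toList, "ar-SA".toList]

-- shared transliteration of the identical first two Python lines of A and B:
-- base = filename.rsplit(".", 1)[0]  (exact hand port: the part before the LAST '.', the whole
-- string if there is none; rfind gives that index or -1), then
-- if "_0_" in base: base = base.split("_0_", 1)[0]  (exact hand port: since "_0_" occurs,
-- split(sep,1)[0] is the part before the FIRST occurrence, i.e. base[:find]).
def pvBase (filename : List Char) : List Char :=
  let r := PySem.Chars.rfind filename ['.']
  let b := if r < 0 then filename else filename.take r.toNat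
  if PySem.Chars.isIn "_0_".toList b then b.take (PySem.Chars.find b "_0_".toList).toNat else b

-- shared transliteration of the identical tail of A and B (remainder.strip(); device/label split).
-- remainder.rsplit("-", 1) is hand-ported exactly as the cut at the LAST '-' (rfind ≥ 0 because
-- "-" in remainder holds on that branch).
def pvFinish (loc rem : List Char) : String × String × String :=
  let rem := PySem.Chars.strip rem
  if rem ≠ [] then
    if PySem.Chars.isIn ['-'] rem then
      let r := (PySem.Chars.rfind rem ['-']).toNat
      (String.ofList loc, String.ofList (PySem.Chars.strip (rem.take r)),
       String.ofList (PySem.Chars.strip (rem.drop (r + 1))))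
    else
      (String.ofList loc, String.ofList (PySem.Chars.strip rem),
       String.ofList (PySem.Chars.strip "screenshot".toList))
  else
    (String.ofList loc, String.ofList (PySem.Chars.strip "device".toList),
     String.ofList (PySem.Chars.strip "screenshot".toList))

-- ===== PORT A =====
-- A's for-loop with break over sorted(SUPPORTED_LOCALES, key=len, reverse=True)
def pvLoopA (base : List Char) : List (List Char) → Option (List Char × List Char)
  | [] => none
  | L :: rest =>
    if base == L || PySem.Chars.startswith base (L ++ ['-']) then
      -- remainder = base[len(locale):], then strip one leading '-'
      some (L, if PySem.Chars.startswith (base.drop L.length) ['-'] then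
                 (base.drop L.length).drop 1
               else base.drop L.length)
    else pvLoopA base rest

def parse_attachment_name (filename : String) : String × String × String :=
  let base := pvBase filename.toList
  match pvLoopA base (PySem.List.sorted pvLocales (fun l => l.length) true) with
  | some (loc, rem) => pvFinish loc rem
  | none =>
    if PySem.Chars.isIn ['-'] base then
      -- exact hand port of base.split("-", 1): cut at the FIRST '-' (find ≥ 0 on this branch)
      let d := (PySem.Chars.find base ['-']).toNat
      pvFinish (base.take d) (base.drop (d + 1))
    else
      pvFinish "en-US".toList base

-- ===== PORT B =====
def pvLocaleSet : PySem.Set (List Char) := PySem.Set.ofList pvLocales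

-- [i for i in range(len(base)) if base[i] == "-"]  (indices are the Nats 0..len-1; exact)
def pvDashes (base : List Char) : List Nat :=
  (List.range base.length).filter (fun i => base[i]? == some '-')

-- B's for-loop with break over [len(base)] + dashes[::-1]; base[:d] / base[d+1:] with d ≥ 0
-- are exactly take / drop
def pvScanB (base : List Char) : List Nat → Option (List Char × List Char)
  | [] => none
  | d :: rest =>
    if PySem.Set.contains pvLocaleSet (base.take d) then
      some (base.take d, base.drop (d + 1))
    else pvScanB base rest

def parse_attachment_name_alt (filename : String) : String × String × String :=
  let base := pvBase filename.toList
  let dashes := pvDashes base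
  match pvScanB base (base.length :: dashes.reverse) with
  | some (loc, rem) => pvFinish loc rem
  | none =>
    match dashes with
    | d0 :: _ => pvFinish (base.take d0) (base.drop (d0 + 1))
    | [] => pvFinish "en-US".toList base

-- ===== PRECONDITION & SPEC =====
def Spec_parse_attachment_name (filename : String) (out : String × String × String) : Prop := out = parse_attachment_name_alt filename
instance (filename : String) (out : String × String × String) : Decidable (Spec_parse_attachment_name filename out) := by unfold Spec_parse_attachment_name; infer_instance

-- ===== CLAIM (what is proved, stated in full; the proofs are below) =====
def Claim_equal_parse_attachment_name : Prop := ∀ (filename : String), Dom_parse_attachment_name filename → Spec_parse_attachment_name filename (parse_attachment_name filename)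

-- ===== LEMMAS AND PROOFS =====

-- A's match test for one locale
def pvMatchA (base L : List Char) : Bool :=
  base == L || PySem.Chars.startswith base (L ++ ['-'])

lemma pvDashes_mem (base : List Char) (i : Nat) :
    i ∈ pvDashes base ↔ i < base.length ∧ base[i]? = some '-' := by
  simp [pvDashes, List.mem_filter, List.mem_range]

lemma pvDashes_pairwise (base : List Char) : (pvDashes base).Pairwise (· < ·) :=
  List.Pairwise.filter _ List.pairwise_lt_range

-- membership in B's candidate list of boundaries
lemma pvBounds_mem (base : List Char) (d : Nat) :
    d ∈ base.length :: (pvDashes base).reverse ↔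
      d = base.length ∨ (d < base.length ∧ base[d]? = some '-') := by
  simp [List.mem_cons, List.mem_reverse, pvDashes_mem]

lemma pvBounds_le (base : List Char) (d : Nat)
    (h : d ∈ base.length :: (pvDashes base).reverse) : d ≤ base.length := by
  rcases (pvBounds_mem base d).1 h with h | h
  · omega
  · omega

lemma pvBounds_pairwise (base : List Char) :
    (base.length :: (pvDashes base).reverse).Pairwise (fun a b => b < a) := by
  refine List.Pairwise.cons ?_ ?_
  · intro d hd
    rcases (pvDashes_mem base d).1 (List.mem_reverse.1 hd) with ⟨h1, _⟩
    exact h1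
  · exact List.pairwise_reverse.2 (pvDashes_pairwise base)

-- A's match condition characterised through dash boundaries
lemma pvMatchA_iff (base L : List Char) :
    pvMatchA base L = true ↔
      L.length ∈ base.length :: (pvDashes base).reverse ∧ base.take L.length = L := by
  rw [pvBounds_mem]
  constructor
  · intro h
    rw [pvMatchA, Bool.or_eq_true] at h
    rcases h with h | h
    · have hb : base = L := by simpa using h
      subst hb
      exact ⟨Or.inl rfl, List.take_length⟩
    · obtain ⟨t, ht⟩ := (PySem.Chars.startswith_iff _ _).1 h
      have hb : base = L ++ '-' :: t := by simpa using ht.symm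
      subst hb
      refine ⟨Or.inr ⟨by simp, ?_⟩, ?_⟩
      · rw [List.getElem?_append_right (le_refl _)]
        simp
      · exact List.take_left
  · rintro ⟨hd, htake⟩
    rw [pvMatchA, Bool.or_eq_true]
    rcases hd with hd | ⟨hlt, hget⟩
    · left
      have : base = L := by rw [← htake, hd, List.take_length]
      simp [this]
    · right
      have hdrop : base.drop L.length = '-' :: base.drop (L.length + 1) := by
        rw [List.drop_eq_getElem_cons hlt]
        congr 1
        exact (List.getElem_eq_iff hlt).2 hget
      have hb : base = L ++ '-' :: base.drop (L.length + 1) := by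
        conv_lhs => rw [← List.take_append_drop L.length base, htake, hdrop]
      refine (PySem.Chars.startswith_iff _ _).2 ?_
      rw [hb]
      exact ⟨base.drop (L.length + 1), by simp⟩

-- A's remainder normalisation equals a single drop once the locale matched
lemma pvRemA_eq (base L : List Char) (h : pvMatchA base L = true) :
    (if PySem.Chars.startswith (base.drop L.length) ['-'] then (base.drop L.length).drop 1
     else base.drop L.length) = base.drop (L.length + 1) := by
  rcases (pvMatchA_iff base L).1 h with ⟨hd, htake⟩
  rcases (pvBounds_mem base L.length).1 hd with hd | ⟨hlt, hget⟩
  · have h1 : base.length ≤ L.length := by omega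
    have h2 : base.length ≤ L.length + 1 := by omega
    rw [List.drop_eq_nil_of_le h1, List.drop_eq_nil_of_le h2]
    simp [PySem.Chars.startswith]
  · have hdrop : base.drop L.length = '-' :: base.drop (L.length + 1) := by
      rw [List.drop_eq_getElem_cons hlt]
      congr 1
      exact (List.getElem_eq_iff hlt).2 hget
    rw [hdrop]
    simp [PySem.Chars.startswith]

lemma pvLoopA_eq_find (base : List Char) (Ls : List (List Char)) :
    pvLoopA base Ls =
      (Ls.find? (fun L => pvMatchA base L)).map (fun L => (L, base.drop (L.length + 1))) := by
  induction Ls with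
  | nil => rfl
  | cons L rest ih =>
    by_cases h : pvMatchA base L = true
    · have hcond : (base == L || PySem.Chars.startswith base (L ++ ['-'])) = true := h
      rw [pvLoopA, List.find?_cons_of_pos h, if_pos hcond, pvRemA_eq base L h, Option.map_some]
    · have hcond : ¬ (base == L || PySem.Chars.startswith base (L ++ ['-'])) = true := h
      rw [pvLoopA, List.find?_cons_of_neg h, ← ih, if_neg hcond]

lemma pvScanB_eq_find (base : List Char) (ds : List Nat) :
    pvScanB base ds =
      (ds.find? (fun d => PySem.Set.contains pvLocaleSet (base.take d))).map
        (fun d => (base.take d, base.drop (d + 1))) := by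
  induction ds with
  | nil => rfl
  | cons d rest ih =>
    by_cases h : PySem.Set.contains pvLocaleSet (base.take d) = true
    · rw [pvScanB,
        List.find?_cons_of_pos (p := fun d => PySem.Set.contains pvLocaleSet (base.take d)) h,
        if_pos h, Option.map_some]
    · rw [pvScanB,
        List.find?_cons_of_neg (p := fun d => PySem.Set.contains pvLocaleSet (base.take d)) h,
        if_neg h, ih]

lemma pvContains_iff (x : List Char) :
    PySem.Set.contains pvLocaleSet x = true ↔ x ∈ pvLocales := by
  rw [PySem.Set.contains_iff, pvLocaleSet, PySem.Set.mem_ofList]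

-- (base.take d).length = d for an in-range boundary
lemma htakelen_helper (base : List Char) (d : Nat) (h : d ≤ base.length) :
    (base.take d).length = d := by simp [h]

-- the heart: the first match of A's length-sorted locale scan is the first (longest) matching
-- dash-boundary prefix of B's scan
lemma pvFind_corr (base : List Char) :
    (PySem.List.sorted pvLocales (fun l => l.length) true).find? (fun L => pvMatchA base L) =
      ((base.length :: (pvDashes base).reverse).find?
        (fun d => PySem.Set.contains pvLocaleSet (base.take d))).map (fun d => base.take d) := by
  set xs := PySem.List.sorted pvLocales (fun l => l.length) true with hxs
  set ds := base.length :: (pvDashes base).reverse with hds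
  have hmemxs : ∀ L, L ∈ xs ↔ L ∈ pvLocales := fun L => PySem.List.mem_sorted _ _ _ _
  have hq : ∀ d, PySem.Set.contains pvLocaleSet (base.take d) = true ↔ base.take d ∈ xs := by
    intro d; rw [pvContains_iff, hmemxs]
  cases hfb : ds.find? (fun d => PySem.Set.contains pvLocaleSet (base.take d)) with
  | none =>
    rw [Option.map_none, List.find?_eq_none]
    intro L hL hpL
    rcases (pvMatchA_iff base L).1 hpL with ⟨hd, htake⟩
    have : PySem.Set.contains pvLocaleSet (base.take L.length) = true := by
      rw [hq, htake, hmemxs]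
      exact (hmemxs L).1 hL
    exact absurd this (by
      have := List.find?_eq_none.1 hfb _ hd
      simpa using this)
  | some d =>
    rcases List.find?_eq_some_iff_append.1 hfb with ⟨hqd, ds1, ds2, hsplit, hprev⟩
    have hdmem : d ∈ ds := by rw [hsplit]; simp
    have hdlen : d ≤ base.length := pvBounds_le base d hdmem
    have htakelen : (base.take d).length = d := by simp [hdlen]
    -- the element A finds
    have hLmem : base.take d ∈ xs := (hq d).1 hqd
    have hpL : pvMatchA base (base.take d) = true := by
      rw [pvMatchA_iff]
      refine ⟨?_, by rw [htakelen]⟩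
      rw [htakelen]; exact hdmem
    have hsome : (xs.find? (fun L => pvMatchA base L)).isSome := by
      rw [List.find?_isSome]
      exact ⟨base.take d, hLmem, hpL⟩
    rcases Option.isSome_iff_exists.1 hsome with ⟨L', hL'⟩
    rcases List.find?_eq_some_iff_append.1 hL' with ⟨hpL', xs1, xs2, hxsplit, hxprev⟩
    -- L' matches, so its length is a boundary that satisfies q
    rcases (pvMatchA_iff base L').1 hpL' with ⟨hd', htake'⟩
    have hq' : PySem.Set.contains pvLocaleSet (base.take L'.length) = true := by
      rw [hq, htake']
      rw [hxsplit]; simp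
    -- earlier boundaries (all > d) fail q, hence L'.length ≤ d
    have hle : L'.length ≤ d := by
      by_contra hgt
      have hgt : d < L'.length := Nat.lt_of_not_le hgt
      have hpw := pvBounds_pairwise base
      rw [show (base.length :: (pvDashes base).reverse) = ds from rfl, hsplit] at hpw
      rcases List.pairwise_append.1 hpw with ⟨_, hpw2, _⟩
      have hmem' : L'.length ∈ ds1 ++ d :: ds2 := by rw [← hsplit]; exact hd'
      rcases List.mem_append.1 hmem' with h | h
      · exact absurd hq' (by simpa using hprev _ h)
      · rcases List.mem_cons.1 h with h | h
        · omega
        · have := (List.pairwise_cons.1 hpw2).1 _ h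
          omega
    -- by sortedness the found locale is at least as long as base.take d
    have hge : d ≤ L'.length := by
      have hpw : xs.Pairwise (fun a b => b.length ≤ a.length) := by
        rw [hxs]
        exact PySem.List.sorted_pairwise_rev pvLocales (fun l => l.length)
      rw [hxsplit] at hpw
      rcases List.pairwise_append.1 hpw with ⟨_, hpw2, _⟩
      have hmemL : base.take d ∈ xs1 ∨ base.take d ∈ L' :: xs2 := by
        rw [hxsplit] at hLmem
        exact List.mem_append.1 hLmem
      rcases hmemL with h | h
      · exact absurd hpL (by simpa using hxprev _ h)
      · rcases List.mem_cons.1 h with h | h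
        · rw [← h, htakelen]
        · have := (List.pairwise_cons.1 hpw2).1 _ h
          rw [htakelen] at this
          exact this
    have hlen' : L'.length = d := le_antisymm hle hge
    rw [hL', Option.map_some]
    rw [← htake', hlen']

-- B's scan agrees with A's loop
lemma pvDetect_eq (base : List Char) :
    pvLoopA base (PySem.List.sorted pvLocales (fun l => l.length) true) =
      pvScanB base (base.length :: (pvDashes base).reverse) := by
  rw [pvLoopA_eq_find, pvScanB_eq_find, pvFind_corr]
  cases hfb : (base.length :: (pvDashes base).reverse).find?
      (fun d => PySem.Set.contains pvLocaleSet (base.take d)) with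
  | none => rfl
  | some d =>
    have hdmem : d ∈ base.length :: (pvDashes base).reverse := by
      rcases List.find?_eq_some_iff_append.1 hfb with ⟨_, ds1, ds2, hsplit, _⟩
      rw [hsplit]; simp
    have hdlen : d ≤ base.length := pvBounds_le base d hdmem
    simp [htakelen_helper base d hdlen]

-- the fallback branches agree too
lemma pvMemDash (base : List Char) (i : Nat) (h1 : i < base.length) (h2 : base[i]? = some '-') :
    ['-'] <+: base.drop i := by
  rw [List.drop_eq_getElem_cons h1, (List.getElem_eq_iff h1).2 h2]
  exact ⟨_, rfl⟩

lemma pvFallback_dash (base : List Char) (h : PySem.Chars.isIn ['-'] base = true) :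
    ∃ d0 rest, pvDashes base = d0 :: rest ∧ (PySem.Chars.find base ['-']).toNat = d0 := by
  have hinf : ['-'] <:+: base := (PySem.Chars.isIn_iff_infix _ _).1 h
  have hpos : 0 ≤ PySem.Chars.find base ['-'] := (PySem.Chars.find_nonneg_iff _ _).2 hinf
  obtain ⟨hpre, hmin⟩ := PySem.Chars.find_spec hpos
  set n := (PySem.Chars.find base ['-']).toNat with hn
  obtain ⟨t, ht⟩ := hpre
  have hlt : n < base.length := by
    by_contra hge
    have : base.drop n = [] := List.drop_eq_nil_of_le (Nat.le_of_not_lt hge)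
    rw [this] at ht
    exact absurd ht (by simp)
  have hget : base[n]? = some '-' := by
    have : base.drop n = '-' :: t := by simpa using ht.symm
    have h0 : (base.drop n)[0]? = some '-' := by rw [this]; rfl
    rw [List.getElem?_drop] at h0
    simpa using h0
  have hmem : n ∈ pvDashes base := (pvDashes_mem base n).2 ⟨hlt, hget⟩
  have hleast : ∀ m ∈ pvDashes base, n ≤ m := by
    intro m hm
    rcases (pvDashes_mem base m).1 hm with ⟨hm1, hm2⟩
    by_contra hlt'
    exact hmin m (Nat.lt_of_not_le hlt') (pvMemDash base m hm1 hm2)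
  cases hd : pvDashes base with
  | nil => rw [hd] at hmem; cases hmem
  | cons d0 rest =>
    refine ⟨d0, rest, rfl, ?_⟩
    rw [hd] at hmem hleast
    have h1 : n ≤ d0 := hleast d0 (List.mem_cons_self)
    have h2 : d0 ≤ n := by
      rcases List.mem_cons.1 hmem with h | h
      · omega
      · have hpw := pvDashes_pairwise base
        rw [hd] at hpw
        have := (List.pairwise_cons.1 hpw).1 _ h
        omega
    omega

lemma pvFallback_nodash (base : List Char) (h : PySem.Chars.isIn ['-'] base = false) :
    pvDashes base = [] := by
  have hninf : ¬ ['-'] <:+: base := (PySem.Chars.isIn_eq_false_iff _ _).1 h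
  rw [pvDashes, List.filter_eq_nil_iff]
  intro i hi
  simp only [List.mem_range] at hi
  intro hc
  have hget : base[i]? = some '-' := by simpa using hc
  exact hninf ((pvMemDash base i hi hget).isInfix.trans (List.drop_suffix i base).isInfix)

-- ===== VERDICT (by name: the statement is the Claim_ definition above) =====
theorem parse_attachment_name_spec : Claim_equal_parse_attachment_name := by
  intro filename _
  unfold Spec_parse_attachment_name parse_attachment_name parse_attachment_name_alt
  generalize pvBase filename.toList = base
  dsimp only
  rw [pvDetect_eq]
  cases hs : pvScanB base (base.length :: (pvDashes base).reverse) with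
  | some p =>
    obtain ⟨loc, rem⟩ := p
    rfl
  | none =>
    by_cases hin : PySem.Chars.isIn ['-'] base = true
    · obtain ⟨d0, rest, hd, hn⟩ := pvFallback_dash base hin
      simp only [if_pos hin, hd, hn]
    · have hf : PySem.Chars.isIn ['-'] base = false := by
        exact Bool.not_eq_true _ ▸ Bool.of_not_eq_true hin
      simp only [if_neg hin, pvFallback_nodash base hf]
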